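-- pv_equiv track=rewrite | github.com/silibringup/rock_python- | tests/mnoc_lib.py | payloadByteToDWarray
-- ===== SOURCE A (Python) =====
-- def payloadByteToDWarray(byteArray):
--     dwArray = []
--     ptr = 0
--     tmpData = 0
--     for i in range(len(byteArray)):
--         tmpData = tmpData | byteArray[i]<<(ptr*8)
--         ptr+=1
--         if ptr == 4 or i == len(byteArray)-1:
--             dwArray.append(tmpData)
--             tmpData = 0
--             ptr = 0
--     return dwArray
-- ===== SOURCE B (Python) =====
-- def payloadByteToDWarray(byteArray):
--     dwArray = []
--     for i in range(0, len(byteArray), 4):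
--         chunk = byteArray[i:i+4]
--         dw = 0
--         for j in range(len(chunk)):
--             dw = dw | (chunk[j] << (j * 8))
--         dwArray.append(dw)
--     return dwArray
-- ===== Notes on version B (the rewrite author's own statement) =====
-- stated objective: simpler
-- what changed: Replaced the flat single-pointer loop with a flush condition by an outer pass over fixed-size 4-byte slices and an inner shift-OR combine of each chunk.
import Mathlib
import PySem

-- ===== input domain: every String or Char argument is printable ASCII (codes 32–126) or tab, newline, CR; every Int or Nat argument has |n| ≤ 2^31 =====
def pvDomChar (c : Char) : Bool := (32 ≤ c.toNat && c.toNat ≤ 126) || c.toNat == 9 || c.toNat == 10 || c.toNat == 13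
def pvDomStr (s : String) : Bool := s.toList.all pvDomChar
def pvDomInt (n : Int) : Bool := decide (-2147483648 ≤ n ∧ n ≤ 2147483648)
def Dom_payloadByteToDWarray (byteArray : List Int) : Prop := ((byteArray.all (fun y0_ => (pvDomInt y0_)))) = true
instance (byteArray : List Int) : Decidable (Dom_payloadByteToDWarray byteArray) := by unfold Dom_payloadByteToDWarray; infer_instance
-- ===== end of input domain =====

-- B repacks the bytes by explicit 4-byte chunking instead of A's flat pointer+flush loop; same values, simpler decomposition.
-- ===== PORT A =====
-- A's for-loop over i with state (dwArray, ptr, tmpData); 'i == len(byteArray)-1' is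
-- transcribed as 'the remaining tail is empty'.
def payloadLoopA : List Int → List Int → Nat → Int → List Int
  | [], dwArray, _, _ => dwArray
  | b :: rest, dwArray, ptr, tmpData =>
    let tmpData' := tmpData.lor (b * 2 ^ (ptr * 8))   -- tmpData | byteArray[i] << (ptr*8)
    let ptr' := ptr + 1
    if ptr' == 4 || rest.isEmpty then payloadLoopA rest (dwArray ++ [tmpData']) 0 0
    else payloadLoopA rest dwArray ptr' tmpData'

def payloadByteToDWarray (byteArray : List Int) : List Int :=
  payloadLoopA byteArray [] 0 0

-- ===== PORT B =====
-- inner loop of B: dw = dw | chunk[j] << (j*8) over the chunk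
def payloadCombineB : List Int → Nat → Int → Int
  | [], _, dw => dw
  | b :: rest, j, dw => payloadCombineB rest (j + 1) (dw.lor (b * 2 ^ (j * 8)))

-- outer loop of B: one dword per 4-byte slice
def payloadChunksB : List Int → List Int
  | [] => []
  | x :: rest =>
    payloadCombineB ((x :: rest).take 4) 0 0 :: payloadChunksB ((x :: rest).drop 4)
  termination_by xs => xs.length
  decreasing_by simp [List.length_drop]

def payloadByteToDWarray_alt (byteArray : List Int) : List Int :=
  payloadChunksB byteArray

-- ===== PRECONDITION & SPEC =====
def Spec_payloadByteToDWarray (byteArray : List Int) (out : List Int) : Prop := out = payloadByteToDWarray_alt byteArray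
instance (byteArray : List Int) (out : List Int) : Decidable (Spec_payloadByteToDWarray byteArray out) := by unfold Spec_payloadByteToDWarray; infer_instance

-- ===== CLAIM (what is proved, stated in full; the proofs are below) =====
def Claim_equal_payloadByteToDWarray : Prop := ∀ (byteArray : List Int), Dom_payloadByteToDWarray byteArray → Spec_payloadByteToDWarray byteArray (payloadByteToDWarray byteArray)

-- ===== LEMMAS AND PROOFS =====

lemma payloadLoopA_chunks : ∀ (xs acc : List Int),
    payloadLoopA xs acc 0 0 = acc ++ payloadChunksB xs
  | [], acc => by simp [payloadLoopA, payloadChunksB]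
  | [b], acc => by simp [payloadLoopA, payloadChunksB, payloadCombineB]
  | [b, c], acc => by simp [payloadLoopA, payloadChunksB, payloadCombineB]
  | [b, c, d], acc => by simp [payloadLoopA, payloadChunksB, payloadCombineB]
  | b :: c :: d :: e :: rest, acc => by
    have ih := payloadLoopA_chunks rest
    simp [payloadLoopA, payloadChunksB, payloadCombineB, ih]
  termination_by xs => xs.length

-- ===== VERDICT (by name: the statement is the Claim_ definition above) =====
theorem payloadByteToDWarray_spec : Claim_equal_payloadByteToDWarray := by
  intro xs _
  unfold Spec_payloadByteToDWarray payloadByteToDWarray payloadByteToDWarray_alt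
  simp [payloadLoopA_chunks]
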